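-- pv_equiv track=rewrite | github.com/aadulla/Address_Generator | code/Access_Analyzer.py | weight_output_L1_parallel_calc_read_count
-- ===== SOURCE A (Python) =====
-- def weight_output_L1_parallel_calc_read_count(op_space_sizes_dict,
--                                               full_prefetch_size,
--                                               num_parallel_instances,
--                                               upper_dim_product,
--                                               static_dim_dict_lst,
--                                               dependency_set,
--                                               lowest_dependency_dim):
--
--     should_multiply = False
--     for static_dim_dict in reversed(static_dim_dict_lst):
--         dim_name, dim_range = list(static_dim_dict.items())[0]
--
--         if dim_name in dependency_set: should_multiply = True
--         if should_multiply: upper_dim_product *= dim_range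
--
--     read_count = full_prefetch_size * \
--                  num_parallel_instances * \
--                  upper_dim_product
--
--     return read_count
-- ===== SOURCE B (Python) =====
-- def weight_output_L1_parallel_calc_read_count(op_space_sizes_dict,
--                                               full_prefetch_size,
--                                               num_parallel_instances,
--                                               upper_dim_product,
--                                               static_dim_dict_lst,
--                                               dependency_set,
--                                               lowest_dependency_dim):
--     # Pass 1: find the index of the LAST dim whose (single) key is in the
--     # dependency set; -1 if none.
--     last = -1
--     for i, static_dim_dict in enumerate(static_dim_dict_lst):
--         if next(iter(static_dim_dict)) in dependency_set:
--             last = i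
--     # Pass 2: product of the dim ranges over the prefix up to and including it.
--     prefix_product = 1
--     for static_dim_dict in static_dim_dict_lst[:last + 1]:
--         prefix_product *= next(iter(static_dim_dict.values()))
--     return full_prefetch_size * num_parallel_instances * upper_dim_product * prefix_product
-- ===== Notes on version B (the rewrite author's own statement) =====
-- stated objective: alternative
-- what changed: Replaces A's single reverse pass with a latched should_multiply flag by two staged forward passes: first locate the index of the last dependency dim, then multiply the dim ranges of the slice up to that boundary.
import Mathlib
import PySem

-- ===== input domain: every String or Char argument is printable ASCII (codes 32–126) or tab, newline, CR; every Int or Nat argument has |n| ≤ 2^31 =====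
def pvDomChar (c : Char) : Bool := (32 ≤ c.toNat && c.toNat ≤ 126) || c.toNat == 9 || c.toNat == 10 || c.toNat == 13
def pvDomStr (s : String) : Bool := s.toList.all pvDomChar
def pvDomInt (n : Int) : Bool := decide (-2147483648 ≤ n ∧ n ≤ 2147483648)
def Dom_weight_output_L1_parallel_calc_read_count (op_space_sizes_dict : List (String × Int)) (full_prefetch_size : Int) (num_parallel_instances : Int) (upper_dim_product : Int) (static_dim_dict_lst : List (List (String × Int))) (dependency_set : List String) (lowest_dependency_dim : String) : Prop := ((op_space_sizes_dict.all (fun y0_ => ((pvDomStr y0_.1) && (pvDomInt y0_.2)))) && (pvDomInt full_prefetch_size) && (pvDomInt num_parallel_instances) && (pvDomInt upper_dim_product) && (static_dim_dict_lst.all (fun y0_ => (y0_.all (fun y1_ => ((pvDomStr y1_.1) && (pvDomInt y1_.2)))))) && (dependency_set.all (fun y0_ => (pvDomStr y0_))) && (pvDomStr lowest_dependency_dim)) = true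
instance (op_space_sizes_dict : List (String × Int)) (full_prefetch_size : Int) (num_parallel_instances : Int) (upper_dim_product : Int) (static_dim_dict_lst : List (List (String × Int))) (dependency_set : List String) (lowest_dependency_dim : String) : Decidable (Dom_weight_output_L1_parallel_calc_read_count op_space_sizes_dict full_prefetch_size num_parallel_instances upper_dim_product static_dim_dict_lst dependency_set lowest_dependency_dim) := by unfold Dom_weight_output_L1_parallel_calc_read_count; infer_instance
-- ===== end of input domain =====

-- ===== PORT A =====
-- B replaces A's reverse latched-flag pass by two staged forward passes
-- (find the last-dependency boundary, then multiply the prefix slice): alternative decomposition, same cost.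
-- A's loop: reversed list, a latched boolean flag; ported as a foldl over the reversed list.
def weight_output_L1_parallel_calc_read_count (op_space_sizes_dict : List (String × Int)) (full_prefetch_size : Int) (num_parallel_instances : Int) (upper_dim_product : Int) (static_dim_dict_lst : List (List (String × Int))) (dependency_set : List String) (lowest_dependency_dim : String) : Int :=
  let st := static_dim_dict_lst.reverse.foldl
    (fun (st : Bool × Int) static_dim_dict =>
      -- list(static_dim_dict.items())[0]: first item; Pre_ excludes the empty dict (IndexError)
      let kv := static_dim_dict.headD ("", 0)
      let should_multiply := st.1 || dependency_set.contains kv.1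
      (should_multiply, if should_multiply then st.2 * kv.2 else st.2))
    (false, upper_dim_product)
  full_prefetch_size * num_parallel_instances * st.2

-- ===== PORT B =====
-- pass 1: index of the last dict whose first key is a dependency (-1 if none), via enumerate;
-- pass 2: product of first values over the slice static_dim_dict_lst[:last+1]
def weight_output_L1_parallel_calc_read_count_alt (op_space_sizes_dict : List (String × Int)) (full_prefetch_size : Int) (num_parallel_instances : Int) (upper_dim_product : Int) (static_dim_dict_lst : List (List (String × Int))) (dependency_set : List String) (lowest_dependency_dim : String) : Int :=
  -- next(iter(d)) / next(iter(d.values())): the dict's first key / value; Pre_ excludes the empty dict (StopIteration)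
  let last : Int := (PySem.List.enumerate static_dim_dict_lst 0).foldl
    (fun (acc : Int) p => if dependency_set.contains (p.2.headD ("", 0)).1 then p.1 else acc) (-1)
  let pfx := PySem.List.slice static_dim_dict_lst none (some (last + 1))
  let prefix_product := pfx.foldl (fun (a : Int) d => a * (d.headD ("", 0)).2) 1
  full_prefetch_size * num_parallel_instances * upper_dim_product * prefix_product

-- ===== PRECONDITION & SPEC =====
-- Pre_ excludes inputs where some inner dict is empty: there Python A raises IndexError
-- (list({}.items())[0]) and B raises StopIteration; neither returns a value.
def Pre_weight_output_L1_parallel_calc_read_count (op_space_sizes_dict : List (String × Int)) (full_prefetch_size : Int) (num_parallel_instances : Int) (upper_dim_product : Int) (static_dim_dict_lst : List (List (String × Int))) (dependency_set : List String) (lowest_dependency_dim : String) : Prop :=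
  ∀ d ∈ static_dim_dict_lst, d ≠ []
instance (op_space_sizes_dict : List (String × Int)) (full_prefetch_size : Int) (num_parallel_instances : Int) (upper_dim_product : Int) (static_dim_dict_lst : List (List (String × Int))) (dependency_set : List String) (lowest_dependency_dim : String) : Decidable (Pre_weight_output_L1_parallel_calc_read_count op_space_sizes_dict full_prefetch_size num_parallel_instances upper_dim_product static_dim_dict_lst dependency_set lowest_dependency_dim) := by unfold Pre_weight_output_L1_parallel_calc_read_count; infer_instance

def pvWitness_weight_output_L1_parallel_calc_read_count : (List (String × Int)) × Int × Int × Int × (List (List (String × Int))) × List String × String :=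
  ([("M", 4)], 2, 3, 5, [[("M", 4)], [("N", 6)]], ["M"], "M")

def Spec_weight_output_L1_parallel_calc_read_count (op_space_sizes_dict : List (String × Int)) (full_prefetch_size : Int) (num_parallel_instances : Int) (upper_dim_product : Int) (static_dim_dict_lst : List (List (String × Int))) (dependency_set : List String) (lowest_dependency_dim : String) (out : Int) : Prop := out = weight_output_L1_parallel_calc_read_count_alt op_space_sizes_dict full_prefetch_size num_parallel_instances upper_dim_product static_dim_dict_lst dependency_set lowest_dependency_dim
instance (op_space_sizes_dict : List (String × Int)) (full_prefetch_size : Int) (num_parallel_instances : Int) (upper_dim_product : Int) (static_dim_dict_lst : List (List (String × Int))) (dependency_set : List String) (lowest_dependency_dim : String) (out : Int) : Decidable (Spec_weight_output_L1_parallel_calc_read_count op_space_sizes_dict full_prefetch_size num_parallel_instances upper_dim_product static_dim_dict_lst dependency_set lowest_dependency_dim out) := by unfold Spec_weight_output_L1_parallel_calc_read_count; infer_instance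

-- ===== CLAIM =====
def Claim_equal_weight_output_L1_parallel_calc_read_count : Prop := ∀ (op_space_sizes_dict : List (String × Int)) (full_prefetch_size : Int) (num_parallel_instances : Int) (upper_dim_product : Int) (static_dim_dict_lst : List (List (String × Int))) (dependency_set : List String) (lowest_dependency_dim : String), Dom_weight_output_L1_parallel_calc_read_count op_space_sizes_dict full_prefetch_size num_parallel_instances upper_dim_product static_dim_dict_lst dependency_set lowest_dependency_dim → Pre_weight_output_L1_parallel_calc_read_count op_space_sizes_dict full_prefetch_size num_parallel_instances upper_dim_product static_dim_dict_lst dependency_set lowest_dependency_dim → Spec_weight_output_L1_parallel_calc_read_count op_space_sizes_dict full_prefetch_size num_parallel_instances upper_dim_product static_dim_dict_lst dependency_set lowest_dependency_dim (weight_output_L1_parallel_calc_read_count op_space_sizes_dict full_prefetch_size num_parallel_instances upper_dim_product static_dim_dict_lst dependency_set lowest_dependency_dim)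

-- ===== LEMMAS AND PROOFS =====

-- does this inner dict's (first) key lie in the dependency set?
def pvMatch (dep : List String) (d : List (String × Int)) : Bool :=
  dep.contains (d.headD ("", 0)).1

-- product of dim ranges of the prefix up to (and including) the LAST matching dict; 1 if no match
def pvR (dep : List String) : List (List (String × Int)) → Int
  | [] => 1
  | d :: t => if pvMatch dep d || t.any (pvMatch dep) then (d.headD ("", 0)).2 * pvR dep t else 1

-- the prefix up to and including the last matching dict
def pvPrefix (dep : List String) : List (List (String × Int)) → List (List (String × Int))
  | [] => []
  | d :: t => if t.any (pvMatch dep) then d :: pvPrefix dep t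
              else if pvMatch dep d then [d] else []

lemma pvR_of_no_match (dep : List String) (L : List (List (String × Int)))
    (h : L.any (pvMatch dep) = false) : pvR dep L = 1 := by
  cases L with
  | nil => rfl
  | cons d t =>
    simp only [List.any_cons, Bool.or_eq_false_iff] at h
    simp [pvR, h.1, h.2]

-- A's reverse latched-flag loop computes (any match, u * pvR)
lemma foldA_eq (dep : List String) (L : List (List (String × Int))) (u : Int) :
    L.reverse.foldl
      (fun (st : Bool × Int) d =>
        let kv := d.headD ("", 0)
        let should := st.1 || dep.contains kv.1
        (should, if should then st.2 * kv.2 else st.2))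
      (false, u)
    = (L.any (pvMatch dep), u * pvR dep L) := by
  rw [List.foldl_reverse]
  induction L with
  | nil => simp [pvR]
  | cons d t ih =>
    simp only [List.foldr_cons, ih, List.any_cons]
    by_cases hm : (d.head?.getD ("", 0)).1 ∈ dep
    · by_cases ht : t.any (pvMatch dep) = true
      · simp [pvR, pvMatch, hm, ht]
        ring
      · simp only [Bool.not_eq_true] at ht
        simp [pvR, pvMatch, hm, ht, pvR_of_no_match dep t ht]
    · by_cases ht : t.any (pvMatch dep) = true
      · simp [pvR, pvMatch, hm, ht]
        ring
      · simp only [Bool.not_eq_true] at ht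
        simp [pvR, pvMatch, hm, ht, pvR_of_no_match dep t ht]

-- B's first pass, abstracted over the enumerate start and the accumulator
def pvLast (dep : List String) (L : List (List (String × Int))) (s : Int) (a : Int) : Int :=
  (PySem.List.enumerate L s).foldl
    (fun (acc : Int) p => if dep.contains (p.2.headD ("", 0)).1 then p.1 else acc) a

lemma pvLast_no_match (dep : List String) (L : List (List (String × Int))) (s a : Int)
    (h : L.any (pvMatch dep) = false) : pvLast dep L s a = a := by
  induction L generalizing s a with
  | nil => simp [pvLast]
  | cons d t ih =>
    simp only [List.any_cons, Bool.or_eq_false_iff] at h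
    have hm' : (d.headD ("", 0)).1 ∉ dep := by simpa [pvMatch] using h.1
    simp only [pvLast, PySem.List.enumerate_cons, List.foldl_cons]
    rw [if_neg (by simpa using hm')]
    exact ih (s + 1) a h.2

lemma pvLast_match (dep : List String) (L : List (List (String × Int))) (s a : Int)
    (h : L.any (pvMatch dep) = true) :
    pvLast dep L s a = s + ((pvPrefix dep L).length : Int) - 1 := by
  induction L generalizing s a with
  | nil => simp at h
  | cons d t ih =>
    simp only [List.any_cons] at h
    simp only [pvLast, PySem.List.enumerate_cons, List.foldl_cons] at *
    by_cases ht : t.any (pvMatch dep) = true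
    · by_cases hm : pvMatch dep d = true
      · rw [if_pos (by simpa [pvMatch] using hm)]
        have := ih (s + 1) s ht
        rw [this]
        simp [pvPrefix, ht]
        ring
      · simp only [Bool.not_eq_true] at hm
        rw [if_neg (by simpa [pvMatch] using hm)]
        have := ih (s + 1) a ht
        rw [this]
        simp [pvPrefix, ht]
        ring
    · simp only [Bool.not_eq_true] at ht
      have hm : pvMatch dep d = true := by
        rcases Bool.or_eq_true_iff.mp h with h' | h'
        · exact h'
        · rw [ht] at h'; exact absurd h' (by simp)
      rw [if_pos (by simpa [pvMatch] using hm)]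
      have := pvLast_no_match dep t (s + 1) s ht
      simp only [pvLast] at this
      rw [this]
      simp [pvPrefix, ht, hm]

-- pvPrefix is the boundary-length prefix of L
lemma take_pvPrefix (dep : List String) (L : List (List (String × Int))) :
    L.take (pvPrefix dep L).length = pvPrefix dep L := by
  induction L with
  | nil => rfl
  | cons d t ih =>
    by_cases ht : t.any (pvMatch dep) = true
    · simp [pvPrefix, ht, ih]
    · simp only [Bool.not_eq_true] at ht
      by_cases hm : pvMatch dep d = true
      · simp [pvPrefix, ht, hm]
      · simp only [Bool.not_eq_true] at hm
        simp [pvPrefix, ht, hm]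

-- the prefix product equals pvR
lemma prod_pvPrefix (dep : List String) (L : List (List (String × Int))) (c : Int) :
    (pvPrefix dep L).foldl (fun (a : Int) d => a * (d.headD ("", 0)).2) c = c * pvR dep L := by
  induction L generalizing c with
  | nil => simp [pvPrefix, pvR]
  | cons d t ih =>
    by_cases ht : t.any (pvMatch dep) = true
    · simp only [pvPrefix, ht, if_pos, List.foldl_cons, ih]
      simp [pvR, ht]
      ring
    · simp only [Bool.not_eq_true] at ht
      by_cases hm : pvMatch dep d = true
      · simp [pvPrefix, pvR, ht, hm, pvR_of_no_match dep t ht]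
      · simp only [Bool.not_eq_true] at hm
        simp [pvPrefix, pvR, ht, hm]

-- pvPrefix is empty iff there is no match
lemma pvPrefix_length_pos (dep : List String) (L : List (List (String × Int)))
    (h : L.any (pvMatch dep) = true) : 0 < (pvPrefix dep L).length := by
  cases L with
  | nil => simp at h
  | cons d t =>
    by_cases ht : t.any (pvMatch dep) = true
    · simp [pvPrefix, ht]
    · simp only [Bool.not_eq_true] at ht
      have hm : pvMatch dep d = true := by
        simp only [List.any_cons] at h
        rcases Bool.or_eq_true_iff.mp h with h' | h'
        · exact h'
        · rw [ht] at h'; exact absurd h' (by simp)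
      simp [pvPrefix, ht, hm]

-- ===== VERDICT =====
theorem weight_output_L1_parallel_calc_read_count_spec : Claim_equal_weight_output_L1_parallel_calc_read_count := by
  intro osd fps npi udp L dep ldd _ _
  unfold Spec_weight_output_L1_parallel_calc_read_count
  unfold weight_output_L1_parallel_calc_read_count weight_output_L1_parallel_calc_read_count_alt
  simp only [foldA_eq dep L udp]
  have hlast : (PySem.List.enumerate L 0).foldl
      (fun (acc : Int) p => if dep.contains (p.2.headD ("", 0)).1 then p.1 else acc) (-1)
      = pvLast dep L 0 (-1) := rfl
  rw [hlast]
  by_cases h : L.any (pvMatch dep) = true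
  · rw [pvLast_match dep L 0 (-1) h]
    have hpos := pvPrefix_length_pos dep L h
    have h1 : (0 : Int) + ((pvPrefix dep L).length : Int) - 1 + 1 = ((pvPrefix dep L).length : Int) := by ring
    rw [h1, PySem.List.slice_to_natCast, take_pvPrefix, prod_pvPrefix]
    ring
  · simp only [Bool.not_eq_true] at h
    rw [pvLast_no_match dep L 0 (-1) h]
    norm_num
    have h0 : PySem.List.slice L none (some (0 : Int)) = L.take 0 := by
      simpa using PySem.List.slice_to_natCast L 0
    rw [h0]
    simp [pvR_of_no_match dep L h]
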